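-- pv_equiv track=rewrite | github.com/notoraptor/pysaurus | pysaurus/core/stringsplit.py | get_previous_word_position
-- ===== SOURCE A (Python) =====
-- import unicodedata
--
-- UNICODE_MATH_CATEGORY = "Sm"
--
-- UNICODE_MODIFIED_CATEGORY = "Sk"
--
-- def is_word(c: str) -> bool:
--     return c.isalnum() or c == "_"
--
-- def is_punc(c: str) -> bool:
--     uc = unicodedata.category(c)
--     return uc.startswith("P") or uc in (
--         UNICODE_MATH_CATEGORY,
--         UNICODE_MODIFIED_CATEGORY,
--     )
--
-- def is_currency(c: str) -> bool:
--     uc = unicodedata.category(c)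
--     return uc == "Sc"
--
-- CAT_NONE = -1
--
-- CAT_SPACE = 0
--
-- CAT_WORD = 1
--
-- CAT_PUNC = 2
--
-- CAT_CURR = 3
--
-- CAT_OTHER = 4
--
-- def get_category(c: str) -> int:
--     if c == " ":
--         return CAT_SPACE
--     elif is_word(c):
--         return CAT_WORD
--     elif is_punc(c):
--         return CAT_PUNC
--     elif is_currency(c):
--         return CAT_CURR
--     else:
--         return CAT_OTHER
--
-- def get_previous_word_position(text: str, start: int):
--     start = min(max(0, start), len(text) - 1)
--     cat = CAT_NONE
--     for i in range(start, -1, -1):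
--         local_cat = get_category(text[i])
--         if cat == CAT_NONE:
--             if local_cat != CAT_SPACE:
--                 cat = local_cat
--         elif local_cat != cat:
--             return i + 1
--     else:
--         return 0
-- ===== SOURCE B (Python) =====
-- import unicodedata
--
-- UNICODE_MATH_CATEGORY = "Sm"
-- UNICODE_MODIFIED_CATEGORY = "Sk"
--
--
-- def is_word(c: str) -> bool:
--     return c.isalnum() or c == "_"
--
--
-- def is_punc(c: str) -> bool:
--     uc = unicodedata.category(c)
--     return uc.startswith("P") or uc in (
--         UNICODE_MATH_CATEGORY,
--         UNICODE_MODIFIED_CATEGORY,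
--     )
--
--
-- def is_currency(c: str) -> bool:
--     return unicodedata.category(c) == "Sc"
--
--
-- CAT_SPACE = 0
-- CAT_WORD = 1
-- CAT_PUNC = 2
-- CAT_CURR = 3
-- CAT_OTHER = 4
--
--
-- def get_category(c: str) -> int:
--     if c == " ":
--         return CAT_SPACE
--     elif is_word(c):
--         return CAT_WORD
--     elif is_punc(c):
--         return CAT_PUNC
--     elif is_currency(c):
--         return CAT_CURR
--     else:
--         return CAT_OTHER
--
--
-- def get_previous_word_position(text: str, start: int):
--     # Forward scan: walk left-to-right up to the clamped start, tracking the
--     # start index of the current same-category run and the start of the most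
--     # recent non-space run, which is exactly the previous word position.
--     s = min(max(0, start), len(text) - 1)
--     ans = 0
--     run_start = 0
--     prev = None
--     for i in range(s + 1):
--         c = get_category(text[i])
--         if c != prev:
--             run_start = i
--             prev = c
--         if c != CAT_SPACE:
--             ans = run_start
--     return ans
-- ===== Notes on version B (the rewrite author's own statement) =====
-- stated objective: alternative
-- what changed: Replaces A's backward flag-driven scan (CAT_NONE sentinel state machine walking from start down to 0) with a single forward left-to-right pass that maintains the start index of the current same-category run and the start of the most recent non-space run, which is the answer.
import Mathlib
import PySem

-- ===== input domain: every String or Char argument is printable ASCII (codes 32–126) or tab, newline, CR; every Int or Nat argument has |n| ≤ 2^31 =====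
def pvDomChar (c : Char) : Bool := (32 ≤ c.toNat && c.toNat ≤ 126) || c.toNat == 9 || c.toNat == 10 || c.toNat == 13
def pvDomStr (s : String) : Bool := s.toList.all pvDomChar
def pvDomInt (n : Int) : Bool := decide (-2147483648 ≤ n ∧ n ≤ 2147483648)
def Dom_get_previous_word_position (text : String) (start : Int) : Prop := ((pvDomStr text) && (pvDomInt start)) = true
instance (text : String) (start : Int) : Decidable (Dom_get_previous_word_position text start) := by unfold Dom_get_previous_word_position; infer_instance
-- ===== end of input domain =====

-- B replaces A's backward sentinel-flag scan by a single forward pass tracking run starts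
-- (alternative decomposition, same cost). Return value only; no argument is mutated.

-- ===== PORT A =====
-- is_punc/is_currency use unicodedata; ported by hand as explicit ASCII character tables,
-- exact on the stated printable-ASCII (plus tab/newline/CR) domain.
def pyIsPunc (c : Char) : Bool := "!\"#%&'()*+,-./:;<=>?@[\\]^`{|}~".toList.contains c
def pyIsCurrency (c : Char) : Bool := c = '$'
def pyIsWord (c : Char) : Bool := c.isAlphanum || c = '_'
def pyCat (c : Char) : Int :=
  if c = ' ' then 0
  else if pyIsWord c then 1
  else if pyIsPunc c then 2
  else if pyIsCurrency c then 3
  else 4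

-- get_category(text[i]) for an in-range index i
def catAt (cs : List Char) (i : Nat) : Int := pyCat (cs.getD i ' ')

-- the for-loop of A: i counts down from start to 0, cat is the flag state (CAT_NONE = -1)
def loopA (cs : List Char) (cat : Int) (i : Nat) : Int :=
  let lc := catAt cs i
  if cat = -1 then
    match i with
    | 0 => 0
    | i' + 1 => loopA cs (if lc ≠ 0 then lc else cat) i'
  else if lc ≠ cat then (i : Int) + 1
  else match i with
    | 0 => 0
    | i' + 1 => loopA cs cat i'

def get_previous_word_position (text : String) (start : Int) : Int :=
  let cs := text.toList
  let s := min (max 0 start) ((cs.length : Int) - 1)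
  if s < 0 then 0 else loopA cs (-1) s.toNat

-- ===== PORT B =====
-- one forward step of B's loop: state is (ans, run_start, prev category)
def stepB (cs : List Char) (st : Int × Int × Option Int) (i : Nat) : Int × Int × Option Int :=
  let c := catAt cs i
  let rs := if some c ≠ st.2.2 then ((i : Int), some c) else (st.2.1, st.2.2)
  ((if c ≠ 0 then rs.1 else st.1), rs.1, rs.2)

def get_previous_word_position_alt (text : String) (start : Int) : Int :=
  let cs := text.toList
  let s := min (max 0 start) ((cs.length : Int) - 1)
  ((List.range (s + 1).toNat).foldl (stepB cs) (0, 0, none)).1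

-- ===== PRECONDITION & SPEC =====
def Spec_get_previous_word_position (text : String) (start : Int) (out : Int) : Prop := out = get_previous_word_position_alt text start
instance (text : String) (start : Int) (out : Int) : Decidable (Spec_get_previous_word_position text start out) := by unfold Spec_get_previous_word_position; infer_instance

-- ===== CLAIM (what is proved, stated in full; the proofs are below) =====
def Claim_equal_get_previous_word_position : Prop := ∀ (text : String) (start : Int), Dom_get_previous_word_position text start → Spec_get_previous_word_position text start (get_previous_word_position text start)

-- ===== LEMMAS AND PROOFS =====
-- the backward run-walk A's loop performs once its flag is set
def runBack (cs : List Char) (cat : Int) : Nat → Int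
  | 0 => if catAt cs 0 = cat then 0 else 1
  | i + 1 => if catAt cs (i + 1) = cat then runBack cs cat i else (i : Int) + 2

theorem pyCat_ne_negOne (c : Char) : pyCat c ≠ -1 := by
  unfold pyCat; split_ifs <;> decide

theorem catAt_ne_negOne (cs : List Char) (i : Nat) : catAt cs i ≠ -1 :=
  pyCat_ne_negOne _

-- once the flag is set (cat ≠ -1), A's loop is the run walk
theorem loopA_eq_runBack (cs : List Char) (cat : Int) (hcat : cat ≠ -1) (i : Nat) :
    loopA cs cat i = runBack cs cat i := by
  induction i with
  | zero =>
    rw [loopA, if_neg hcat, runBack]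
    by_cases h : catAt cs 0 = cat <;> simp [h]
  | succ i' ih =>
    rw [loopA, if_neg hcat, runBack]
    by_cases h : catAt cs (i' + 1) = cat <;> simp [h, ih]
    omega

-- the forward fold's state after processing 0..n: answer = A's backward result,
-- run_start = start of the run containing n, prev = category at n
theorem foldB_invariant (cs : List Char) (n : Nat) :
    (List.range (n + 1)).foldl (stepB cs) (0, 0, none) =
      (loopA cs (-1) n, runBack cs (catAt cs n) n, some (catAt cs n)) := by
  induction n with
  | zero =>
    simp only [List.range_succ, List.range_zero, List.nil_append, List.foldl_cons, List.foldl_nil]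
    rw [stepB, loopA, runBack]
    simp
  | succ n ih =>
    rw [List.range_succ, List.foldl_append, ih, List.foldl_cons, List.foldl_nil]
    simp only [stepB, ne_eq, Option.some.injEq, ite_not]
    by_cases heq : catAt cs (n + 1) = catAt cs n
    · have hrb : runBack cs (catAt cs (n + 1)) (n + 1) = runBack cs (catAt cs n) n := by
        rw [runBack, if_pos rfl, heq]
      rw [if_pos heq]
      by_cases h0 : catAt cs (n + 1) = 0
      · have hA : loopA cs (-1) (n + 1) = loopA cs (-1) n := by
          rw [loopA]; simp [h0]
        rw [if_pos h0, hA, hrb, heq]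
      · have hA : loopA cs (-1) (n + 1) = runBack cs (catAt cs (n + 1)) n := by
          rw [loopA]
          simp only [ne_eq, h0, not_false_eq_true, if_pos]
          exact loopA_eq_runBack cs _ (catAt_ne_negOne cs (n + 1)) n
        rw [if_neg h0, hA, hrb, heq]
    · have hne : ¬ (catAt cs n = catAt cs (n + 1)) := fun h => heq h.symm
      have hrn : runBack cs (catAt cs (n + 1)) n = ((n + 1 : Nat) : Int) := by
        cases n with
        | zero => rw [runBack, if_neg hne]; norm_num
        | succ m => rw [runBack, if_neg hne]; push_cast; ring
      have hrb : runBack cs (catAt cs (n + 1)) (n + 1) = ((n + 1 : Nat) : Int) := by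
        rw [runBack, if_pos rfl, hrn]
      rw [if_neg heq]
      by_cases h0 : catAt cs (n + 1) = 0
      · have hA : loopA cs (-1) (n + 1) = loopA cs (-1) n := by
          rw [loopA]; simp [h0]
        rw [if_pos h0, hA, hrb]
      · have hA : loopA cs (-1) (n + 1) = runBack cs (catAt cs (n + 1)) n := by
          rw [loopA]
          simp only [ne_eq, h0, not_false_eq_true, if_pos]
          exact loopA_eq_runBack cs _ (catAt_ne_negOne cs (n + 1)) n
        rw [if_neg h0, hA, hrn, hrb]

-- the two ports, with the clamped start generalized
theorem main_eq (cs : List Char) (s : Int) :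
    (if s < 0 then 0 else loopA cs (-1) s.toNat) =
      ((List.range (s + 1).toNat).foldl (stepB cs) (0, 0, none)).1 := by
  by_cases hneg : s < 0
  · have hL : (s + 1).toNat = 0 := by omega
    rw [if_pos hneg, hL]
    simp
  · have hL : (s + 1).toNat = s.toNat + 1 := by omega
    rw [if_neg hneg, hL, foldB_invariant]

-- ===== VERDICT (by name: the statement is the Claim_ definition above) =====
theorem get_previous_word_position_spec : Claim_equal_get_previous_word_position := by
  intro text start _
  exact main_eq text.toList (min (max 0 start) ((text.toList.length : Int) - 1))
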